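-- pv_equiv track=rewrite | github.com/APN-Pucky/xsec | fix_duplicate_key_in_json.py | myhook
-- ===== SOURCE A (Python) =====
-- def myhook(pairs):
--     d = {}
--     for k, v in pairs:
--         if k not in d:
--           d[k] = v
--         else:
--           d[k] = {**d[k],**v}
--     return d
-- ===== SOURCE B (Python) =====
-- def myhook(pairs):
--     # Two-pass decomposition: group values per key, then reduce each group
--     # by left-folded shallow dict union.
--     groups = {}
--     for k, v in pairs:
--         groups.setdefault(k, []).append(v)
--     out = {}
--     for k, vs in groups.items():
--         m = vs[0]
--         for v in vs[1:]:
--             m = {**m, **v}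
--         out[k] = m
--     return out
-- ===== Notes on version B (the rewrite author's own statement) =====
-- stated objective: alternative
-- what changed: Single conditional-merge loop replaced by a two-pass decomposition: first group all values per key into lists, then produce the result by left-folding the shallow dict union over each group.
import Mathlib
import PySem

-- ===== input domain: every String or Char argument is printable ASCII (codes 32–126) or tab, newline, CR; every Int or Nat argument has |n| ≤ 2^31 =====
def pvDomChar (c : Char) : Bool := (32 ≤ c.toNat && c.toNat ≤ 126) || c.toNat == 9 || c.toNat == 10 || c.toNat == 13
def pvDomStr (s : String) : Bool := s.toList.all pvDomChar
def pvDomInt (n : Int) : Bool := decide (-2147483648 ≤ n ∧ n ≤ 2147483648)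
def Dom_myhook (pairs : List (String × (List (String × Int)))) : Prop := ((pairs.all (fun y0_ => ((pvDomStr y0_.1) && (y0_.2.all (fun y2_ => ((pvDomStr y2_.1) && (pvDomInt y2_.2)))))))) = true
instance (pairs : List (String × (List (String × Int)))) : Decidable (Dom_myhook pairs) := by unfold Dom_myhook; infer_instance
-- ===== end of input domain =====

-- B replaces A's single conditional-merge loop by a two-pass decomposition (group values per key,
-- then left-fold the shallow dict union over each group); alternative structure, same cost.

-- ===== PORT A =====
-- Python values v are dicts; at the Lean boundary each inner assoc list is read as a dict (ofList).
def pvStepA (d : PySem.Dict String (PySem.Dict String Int))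
    (p : String × List (String × Int)) : PySem.Dict String (PySem.Dict String Int) :=
  let v := PySem.Dict.ofList p.2
  if d.contains p.1 then
    -- d[k] = {**d[k], **v}
    d.insert p.1 (PySem.Dict.update (d.getD p.1 PySem.Dict.empty) v.items)
  else
    d.insert p.1 v

def myhook (pairs : List (String × (List (String × Int)))) : List (String × List (String × Int)) :=
  let d := pairs.foldl pvStepA PySem.Dict.empty
  d.items.map (fun p => (p.1, p.2.items))

-- ===== PORT B =====
-- {**a, **b}
def pvUnion (a b : PySem.Dict String Int) : PySem.Dict String Int :=
  PySem.Dict.update a b.items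

-- left fold of pvUnion over a (nonempty in practice) group; [] never occurs
def pvReduce : List (PySem.Dict String Int) → PySem.Dict String Int
  | [] => PySem.Dict.empty
  | v :: rest => rest.foldl pvUnion v

def pvStepB (g : PySem.Dict String (List (PySem.Dict String Int)))
    (p : String × List (String × Int)) : PySem.Dict String (List (PySem.Dict String Int)) :=
  -- groups.setdefault(k, []).append(v)
  g.modify p.1 [] (fun vs => vs ++ [PySem.Dict.ofList p.2])

def myhook_alt (pairs : List (String × (List (String × Int)))) : List (String × List (String × Int)) :=
  let groups := pairs.foldl pvStepB PySem.Dict.empty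
  groups.items.map (fun p => (p.1, (pvReduce p.2).items))

-- ===== PRECONDITION & SPEC =====
def Spec_myhook (pairs : List (String × (List (String × Int)))) (out : List (String × List (String × Int))) : Prop := out = myhook_alt pairs
instance (pairs : List (String × (List (String × Int)))) (out : List (String × List (String × Int))) : Decidable (Spec_myhook pairs out) := by unfold Spec_myhook; infer_instance

-- ===== CLAIM (what is proved, stated in full; the proofs are below) =====
def Claim_equal_myhook : Prop := ∀ (pairs : List (String × (List (String × Int)))), Dom_myhook pairs → Spec_myhook pairs (myhook pairs)

-- ===== LEMMAS AND PROOFS =====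

-- rendering a group entry to the merged dict A maintains
def pvRender (p : String × List (PySem.Dict String Int)) : String × PySem.Dict String Int :=
  (p.1, pvReduce p.2)

lemma pvReduce_append_singleton (vs : List (PySem.Dict String Int)) (w : PySem.Dict String Int)
    (h : vs ≠ []) : pvReduce (vs ++ [w]) = pvUnion (pvReduce vs) w := by
  cases vs with
  | nil => exact absurd rfl h
  | cons a t => simp [pvReduce, List.foldl_append]

lemma pvLoop_eq (ps : List (String × List (String × Int)))
    (g : PySem.Dict String (List (PySem.Dict String Int)))
    (d : PySem.Dict String (PySem.Dict String Int))
    (hg : g.keys.Nodup)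
    (hne : ∀ p ∈ g.items, p.2 ≠ ([] : List (PySem.Dict String Int)))
    (h : d.items = g.items.map pvRender) :
    (ps.foldl pvStepA d).items = (ps.foldl pvStepB g).items.map pvRender := by
  induction ps generalizing g d with
  | nil => simpa using h
  | cons q ps ih =>
    have hdkeys : d.keys = g.keys := by
      simp only [PySem.Dict.keys, h, List.map_map]
      exact List.map_congr_left (fun p _ => rfl)
    have hdnodup : d.keys.Nodup := hdkeys ▸ hg
    have hcont : d.contains q.1 = g.contains q.1 := by
      rw [PySem.Dict.contains_eq_decide_mem_keys, PySem.Dict.contains_eq_decide_mem_keys, hdkeys]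
    have hmodify : pvStepB g q = g.insert q.1 (g.getD q.1 [] ++ [PySem.Dict.ofList q.2]) := rfl
    simp only [List.foldl_cons]
    by_cases hc : g.contains q.1 = true
    · -- duplicate key: both sides replace the entry at q.1 in place
      have hdc : d.contains q.1 = true := by rw [hcont]; exact hc
      apply ih
      · rw [hmodify]; exact PySem.Dict.nodup_keys_insert g q.1 _ hg
      · intro p hp
        rw [hmodify, PySem.Dict.items_insert_of_contains g _ hc] at hp
        obtain ⟨r, hr, hrp⟩ := List.mem_map.mp hp
        by_cases hk : (r.1 == q.1) = true
        · rw [if_pos hk] at hrp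
          subst hrp; simp
        · rw [if_neg hk] at hrp
          subst hrp; exact hne r hr
      · rw [show pvStepA d q = d.insert q.1 (PySem.Dict.update (d.getD q.1 PySem.Dict.empty) (PySem.Dict.ofList q.2).items) from by
              simp [pvStepA, hdc],
            PySem.Dict.items_insert_of_contains d _ hdc,
            hmodify, PySem.Dict.items_insert_of_contains g _ hc, h,
            List.map_map, List.map_map]
        apply List.map_congr_left
        intro r hr
        by_cases hk : (r.1 == q.1) = true
        · have hk' : r.1 = q.1 := eq_of_beq hk
          have hvr : g.getD r.1 [] = r.2 :=
            PySem.Dict.getD_of_mem_items g (Prod.mk.eta ▸ hr) hg []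
          have hdr : d.getD r.1 PySem.Dict.empty = pvReduce r.2 := by
            apply PySem.Dict.getD_of_mem_items d _ hdnodup
            rw [h]
            exact List.mem_map.mpr ⟨r, hr, rfl⟩
          simp only [Function.comp, pvRender, hk, if_pos]
          rw [← hk', hdr, hvr]
          rw [pvReduce_append_singleton r.2 _ (hne r hr)]
          rfl
        · simp [Function.comp, pvRender, hk]
    · -- fresh key: both sides append a new entry
      have hc' : g.contains q.1 = false := by simpa using hc
      have hdc : d.contains q.1 = false := by rw [hcont]; exact hc'
      have hgD : g.getD q.1 [] = [] := PySem.Dict.getD_of_not_contains g [] hc'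
      apply ih
      · rw [hmodify]; exact PySem.Dict.nodup_keys_insert g q.1 _ hg
      · intro p hp
        rw [hmodify, PySem.Dict.items_insert_of_not_contains g _ hc', List.mem_append] at hp
        rcases hp with hp | hp
        · exact hne p hp
        · simp only [List.mem_singleton] at hp
          subst hp; simp [hgD]
      · rw [show pvStepA d q = d.insert q.1 (PySem.Dict.ofList q.2) from by simp [pvStepA, hdc],
            PySem.Dict.items_insert_of_not_contains d _ hdc,
            hmodify, PySem.Dict.items_insert_of_not_contains g _ hc', h, hgD,
            List.map_append]
        rfl

-- ===== VERDICT (by name: the statement is the Claim_ definition above) =====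
theorem myhook_spec : Claim_equal_myhook := by
  intro pairs _
  show (List.foldl pvStepA PySem.Dict.empty pairs).items.map (fun p => (p.1, p.2.items))
      = (List.foldl pvStepB PySem.Dict.empty pairs).items.map (fun p => (p.1, (pvReduce p.2).items))
  rw [pvLoop_eq pairs PySem.Dict.empty PySem.Dict.empty PySem.Dict.nodup_keys_empty
        (by intro p hp; simp [PySem.Dict.empty] at hp) rfl,
      List.map_map]
  rfl
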